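-- pv_equiv track=rewrite | github.com/BuiKhanh2007/python | exercixe/bai12.py | vonva
-- ===== SOURCE A (Python) =====
-- def vonva(x,y,k):
--   minn = min(x,y)
--   count=0
--   for j in range(1,minn+1):
--     if x%j==0 and y%j==0:
--       count+=1
--     if count == k :
--       return j
--   return -1
-- ===== SOURCE B (Python) =====
-- # B: gcd via Euclid, then enumerate divisor pairs up to sqrt(gcd); k-th smallest by index.
-- def vonva(x, y, k):
--     if x <= 0 or y <= 0 or k <= 0:
--         return -1
--     a, b = x, y
--     while b:
--         a, b = b, a % b
--     g = a
--     small = []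
--     large = []
--     d = 1
--     while d * d <= g:
--         if g % d == 0:
--             small.append(d)
--             if d * d != g:
--                 large.append(g // d)
--         d += 1
--     divs = small + large[::-1]
--     if k <= len(divs):
--         return divs[k - 1]
--     return -1
-- ===== Notes on version B (the rewrite author's own statement) =====
-- stated objective: faster
-- what changed: A scans every j from 1 to min(x,y) counting common divisors; B computes g = gcd(x,y) by Euclid, enumerates divisor pairs (d, g//d) only up to sqrt(g), concatenates the two halves in sorted order and indexes the k-th entry directly.
import Mathlib
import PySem

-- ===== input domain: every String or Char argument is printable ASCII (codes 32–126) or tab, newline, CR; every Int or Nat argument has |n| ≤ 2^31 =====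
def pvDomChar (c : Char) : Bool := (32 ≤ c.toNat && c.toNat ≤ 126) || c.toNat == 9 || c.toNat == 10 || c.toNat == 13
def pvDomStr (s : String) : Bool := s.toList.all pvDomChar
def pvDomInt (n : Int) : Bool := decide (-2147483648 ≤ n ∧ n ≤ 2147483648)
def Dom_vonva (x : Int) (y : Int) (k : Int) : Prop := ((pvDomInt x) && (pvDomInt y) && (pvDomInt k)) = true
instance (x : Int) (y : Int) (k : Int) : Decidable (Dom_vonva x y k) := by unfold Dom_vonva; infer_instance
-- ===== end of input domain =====

-- B replaces A's scan of 1..min(x,y) by Euclid's gcd plus divisor-pair enumeration up to sqrt(gcd): asymptotically faster, same return value everywhere.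

-- ===== PORT A =====
-- the for-loop of A over range(1, minn+1) carrying `count`
def vonvaGo (x : Int) (y : Int) (k : Int) : List Int → Int → Int
  | [], _ => -1
  | j :: rest, count =>
    let count' : Int :=
      if PySem.Int.mod x j = 0 ∧ PySem.Int.mod y j = 0 then count + 1 else count
    if count' = k then j else vonvaGo x y k rest count'

def vonva (x : Int) (y : Int) (k : Int) : Int :=
  vonvaGo x y k (PySem.List.pyRange 1 (min x y + 1) 1) 0

-- ===== PORT B =====
-- Euclid's gcd: `while b: a, b = b, a % b`
def bGcd (a : Int) (b : Int) : Int :=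
  if h : b = 0 then a
  else bGcd b (PySem.Int.mod a b)
termination_by b.natAbs
decreasing_by
  rcases lt_or_gt_of_ne h with hneg | hpos
  · have := PySem.Int.mod_neg_bounds (a := a) hneg
    omega
  · have h1 := PySem.Int.mod_nonneg (a := a) hpos
    have h2 := PySem.Int.mod_lt (a := a) hpos
    omega

-- `while d*d <= g`, collecting small divisors and their cofactors
def bLoop (g : Int) (d : Int) : List Int × List Int :=
  if h : d * d ≤ g then
    let p := bLoop g (d + 1)
    if PySem.Int.mod g d = 0 then
      (d :: p.1, if d * d ≠ g then PySem.Int.floordiv g d :: p.2 else p.2)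
    else p
  else ([], [])
termination_by (g + 1 - d).toNat
decreasing_by
  have hd : d ≤ g := by nlinarith [mul_self_nonneg d, mul_self_nonneg (d - 1)]
  omega

def vonva_alt (x : Int) (y : Int) (k : Int) : Int :=
  if x ≤ 0 ∨ y ≤ 0 ∨ k ≤ 0 then -1
  else
    let g := bGcd x y
    let p := bLoop g 1
    let divs := p.1 ++ p.2.reverse
    if k ≤ (divs.length : Int) then (PySem.List.pyGet? divs (k - 1)).getD (-1)
    else -1

-- ===== PRECONDITION & SPEC =====
def Spec_vonva (x : Int) (y : Int) (k : Int) (out : Int) : Prop := out = vonva_alt x y k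
instance (x : Int) (y : Int) (k : Int) (out : Int) : Decidable (Spec_vonva x y k out) := by unfold Spec_vonva; infer_instance

-- ===== CLAIM (what is proved, stated in full; the proofs are below) =====
def Claim_equal_vonva : Prop := ∀ (x : Int) (y : Int) (k : Int), Dom_vonva x y k → Spec_vonva x y k (vonva x y k)

-- ===== LEMMAS AND PROOFS =====

-- once count has passed k it never comes back: A returns -1
theorem vonvaGo_gt (x y k : Int) (L : List Int) : ∀ c : Int, k < c → vonvaGo x y k L c = -1 := by
  induction L with
  | nil => intro c _; simp [vonvaGo]
  | cons j rest ih =>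
    intro c hc
    by_cases hp : PySem.Int.mod x j = 0 ∧ PySem.Int.mod y j = 0
    · simp only [vonvaGo, hp.1, hp.2, and_self, if_true]
      rw [if_neg (by omega)]
      exact ih (c + 1) (by omega)
    · simp only [vonvaGo, hp, if_false]
      rw [if_neg (by omega)]
      exact ih c hc

-- A's loop returns the (k-c)-th element of the filtered range (or -1)
theorem vonvaGo_char (x y k : Int) (L : List Int) : ∀ c : Int, c < k →
    vonvaGo x y k L c =
      ((L.filter (fun j => decide (PySem.Int.mod x j = 0 ∧ PySem.Int.mod y j = 0)))[(k - c - 1).toNat]?).getD (-1) := by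
  induction L with
  | nil => intro c _; simp [vonvaGo]
  | cons j rest ih =>
    intro c hc
    by_cases hp : PySem.Int.mod x j = 0 ∧ PySem.Int.mod y j = 0
    · simp only [vonvaGo, hp.1, hp.2, and_self, if_true]
      rw [List.filter_cons_of_pos (by simpa using hp)]
      by_cases hk : c + 1 = k
      · rw [if_pos hk]
        have h0 : (k - c - 1).toNat = 0 := by omega
        simp [h0]
      · rw [if_neg hk]
        have hstep : (k - c - 1).toNat = (k - (c + 1) - 1).toNat + 1 := by omega
        rw [ih (c + 1) (by omega), hstep]
        simp
    · simp only [vonvaGo, hp, if_false]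
      rw [if_neg (by omega), List.filter_cons_of_neg (by simpa using hp)]
      exact ih c hc

-- one Euclid step preserves the gcd
theorem gcd_step (a b : Int) : Int.gcd a b = Int.gcd b (a % b) := by
  apply Nat.dvd_antisymm
  · refine Int.dvd_gcd (Int.gcd_dvd_right a b) ?_
    rw [Int.emod_def]
    exact dvd_sub (Int.gcd_dvd_left a b) ((Int.gcd_dvd_right a b).mul_right (a / b))
  · refine Int.dvd_gcd ?_ (Int.gcd_dvd_left b (a % b))
    have h := Int.mul_ediv_add_emod a b
    calc (Int.gcd b (a % b) : Int) ∣ b * (a / b) + a % b :=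
          dvd_add ((Int.gcd_dvd_left b (a % b)).mul_right (a / b)) (Int.gcd_dvd_right b (a % b))
      _ = a := h

theorem bGcd_eq (a b : Int) (ha : 0 ≤ a) (hb : 0 ≤ b) : bGcd a b = (Int.gcd a b : Int) := by
  rw [bGcd]
  by_cases h : b = 0
  · subst h
    simp [Int.gcd_zero_right, Int.natAbs_of_nonneg ha]
  · rw [dif_neg h]
    have hbpos : 0 < b := lt_of_le_of_ne hb (Ne.symm h)
    rw [PySem.Int.mod_eq_emod_of_pos hbpos]
    have hmod : 0 ≤ a % b := Int.emod_nonneg a h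
    rw [bGcd_eq b (a % b) hb hmod, ← gcd_step]
termination_by b.natAbs
decreasing_by
  have h1 : 0 ≤ a % b := Int.emod_nonneg a h
  have h2 : a % b < b := Int.emod_lt_of_pos a (lt_of_le_of_ne hb (Ne.symm h))
  omega

-- if e divides g, d*e ≤ g but (d+1)*e > g, then g = d*e
theorem cofactor_pin (g d e : Int) (he : 1 ≤ e) (hdvd : e ∣ g)
    (h1 : d * e ≤ g) (h2 : ¬ (d + 1) * e ≤ g) : g = d * e := by
  obtain ⟨c, hc⟩ := hdvd
  have hde : d ≤ c := by nlinarith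
  have hcd : c ≤ d := by nlinarith
  have : c = d := le_antisymm hcd hde
  subst this
  rw [hc, mul_comm]

-- full characterisation of bLoop's two lists
theorem bLoop_char (g d : Int) (hg : 1 ≤ g) (hd : 1 ≤ d) :
    (∀ e : Int, e ∈ (bLoop g d).1 ↔ d ≤ e ∧ e * e ≤ g ∧ e ∣ g) ∧
    (∀ e : Int, e ∈ (bLoop g d).2 ↔ 1 ≤ e ∧ g < e * e ∧ d * e ≤ g ∧ e ∣ g) ∧
    (bLoop g d).1.Pairwise (· < ·) ∧ (bLoop g d).2.Pairwise (fun a b => b < a) := by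
  rw [bLoop]
  by_cases hdd : d * d ≤ g
  · rw [dif_pos hdd]
    obtain ⟨ihS, ihL, ihPS, ihPL⟩ := bLoop_char g (d + 1) hg (by omega)
    by_cases hdvd : PySem.Int.mod g d = 0
    · have hdvd' : d ∣ g := (PySem.Int.mod_eq_zero_iff_dvd g d).mp hdvd
      rw [if_pos hdvd]
      have hsmall : ∀ e : Int, e ∈ d :: (bLoop g (d + 1)).1 ↔ d ≤ e ∧ e * e ≤ g ∧ e ∣ g := by
        intro e
        simp only [List.mem_cons, ihS e]
        constructor
        · rintro (rfl | ⟨h1, h2, h3⟩)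
          · exact ⟨le_rfl, hdd, hdvd'⟩
          · exact ⟨by omega, h2, h3⟩
        · rintro ⟨h1, h2, h3⟩
          by_cases he : e = d
          · exact Or.inl he
          · exact Or.inr ⟨by omega, h2, h3⟩
      have hPsmall : (d :: (bLoop g (d + 1)).1).Pairwise (· < ·) := by
        refine List.pairwise_cons.mpr ⟨?_, ihPS⟩
        intro e he
        have := (ihS e).mp he
        omega
      have hLweak : ∀ e : Int, e ∈ (bLoop g (d + 1)).2 → 1 ≤ e ∧ g < e * e ∧ d * e ≤ g ∧ e ∣ g := by
        intro e he
        obtain ⟨h1, h2, h3, h4⟩ := (ihL e).mp he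
        refine ⟨h1, h2, ?_, h4⟩
        nlinarith
      by_cases hsq : d * d = g
      · rw [if_neg (by simpa using hsq)]
        refine ⟨hsmall, ?_, hPsmall, ihPL⟩
        intro e
        constructor
        · exact hLweak e
        · rintro ⟨h1, h2, h3, h4⟩
          exfalso
          nlinarith
      · rw [if_pos (by simpa using hsq)]
        have hdpos : (0:Int) < d := by omega
        rw [PySem.Int.floordiv_eq_ediv_of_pos hdpos]
        set q := g / d with hqdef
        have hq : d * q = g := Int.mul_ediv_cancel' hdvd'
        have hq1 : 1 ≤ q := by nlinarith
        have hlt : d * d < g := lt_of_le_of_ne hdd hsq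
        have hdq : d < q := by nlinarith
        have hqq : g < q * q := by nlinarith
        have hqdvd : q ∣ g := ⟨d, by rw [← hq, mul_comm]⟩
        refine ⟨hsmall, ?_, hPsmall, ?_⟩
        · intro e
          simp only [List.mem_cons]
          constructor
          · rintro (rfl | he)
            · exact ⟨hq1, hqq, by omega, hqdvd⟩
            · exact hLweak e he
          · rintro ⟨h1, h2, h3, h4⟩
            by_cases hle : (d + 1) * e ≤ g
            · exact Or.inr ((ihL e).mpr ⟨h1, h2, hle, h4⟩)
            · left
              have hge : g = d * e := cofactor_pin g d e h1 h4 h3 hle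
              have : d * e = d * q := by rw [hq, ← hge]
              exact mul_left_cancel₀ (by omega) this
        · refine List.pairwise_cons.mpr ⟨?_, ihPL⟩
          intro e he
          obtain ⟨h1, h2, h3, h4⟩ := (ihL e).mp he
          nlinarith
    · rw [if_neg hdvd]
      have hndvd : ¬ d ∣ g := fun hc => hdvd ((PySem.Int.mod_eq_zero_iff_dvd g d).mpr hc)
      refine ⟨?_, ?_, ihPS, ihPL⟩
      · intro e
        rw [ihS e]
        constructor
        · rintro ⟨h1, h2, h3⟩; exact ⟨by omega, h2, h3⟩
        · rintro ⟨h1, h2, h3⟩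
          have : e ≠ d := fun hc => hndvd (hc ▸ h3)
          exact ⟨by omega, h2, h3⟩
      · intro e
        rw [ihL e]
        constructor
        · rintro ⟨h1, h2, h3, h4⟩
          exact ⟨h1, h2, by nlinarith, h4⟩
        · rintro ⟨h1, h2, h3, h4⟩
          by_cases hle : (d + 1) * e ≤ g
          · exact ⟨h1, h2, hle, h4⟩
          · exfalso
            have hge : g = d * e := cofactor_pin g d e h1 h4 h3 hle
            exact hndvd ⟨e, hge⟩
  · rw [dif_neg hdd]
    refine ⟨?_, ?_, List.Pairwise.nil, List.Pairwise.nil⟩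
    · intro e
      simp only [List.not_mem_nil, false_iff]
      rintro ⟨h1, h2, h3⟩
      nlinarith
    · intro e
      simp only [List.not_mem_nil, false_iff]
      rintro ⟨h1, h2, h3, h4⟩
      nlinarith
termination_by (g + 1 - d).toNat
decreasing_by
  have hle : d ≤ g := by nlinarith [mul_self_nonneg (d - 1)]
  omega

-- A's filtered range equals B's assembled divisor list
theorem lists_eq (x y : Int) (hx : 1 ≤ x) (hy : 1 ≤ y) :
    (PySem.List.pyRange 1 (min x y + 1) 1).filter
        (fun j => decide (PySem.Int.mod x j = 0 ∧ PySem.Int.mod y j = 0))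
      = (bLoop (bGcd x y) 1).1 ++ (bLoop (bGcd x y) 1).2.reverse := by
  have hgeq : bGcd x y = (Int.gcd x y : Int) := bGcd_eq x y (by omega) (by omega)
  have hgne : Int.gcd x y ≠ 0 := by
    simp only [Ne, Int.gcd_eq_zero_iff]
    rintro ⟨h, -⟩; omega
  have hg1 : 1 ≤ bGcd x y := by rw [hgeq]; exact_mod_cast Nat.one_le_iff_ne_zero.mpr hgne
  obtain ⟨chS, chL, pS, pL⟩ := bLoop_char (bGcd x y) 1 hg1 le_rfl
  have hdvd_iff : ∀ e : Int, e ∣ bGcd x y ↔ e ∣ x ∧ e ∣ y := by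
    intro e
    rw [hgeq]
    constructor
    · intro h
      exact ⟨h.trans (Int.gcd_dvd_left x y), h.trans (Int.gcd_dvd_right x y)⟩
    · rintro ⟨h1, h2⟩
      have hn : e.natAbs ∣ Int.gcd x y :=
        Int.dvd_gcd (Int.natAbs_dvd.mpr h1) (Int.natAbs_dvd.mpr h2)
      exact Int.natAbs_dvd.mp (Int.natCast_dvd_natCast.mpr hn)
  have memL : ∀ e : Int,
      (e ∈ (PySem.List.pyRange 1 (min x y + 1) 1).filter
          (fun j => decide (PySem.Int.mod x j = 0 ∧ PySem.Int.mod y j = 0)))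
        ↔ 1 ≤ e ∧ e ∣ bGcd x y := by
    intro e
    rw [List.mem_filter, PySem.List.mem_pyRange_one]
    simp only [decide_eq_true_eq, PySem.Int.mod_eq_zero_iff_dvd]
    constructor
    · rintro ⟨⟨h1, _⟩, h3, h4⟩
      exact ⟨h1, (hdvd_iff e).mpr ⟨h3, h4⟩⟩
    · rintro ⟨h1, h2⟩
      obtain ⟨h3, h4⟩ := (hdvd_iff e).mp h2
      have hex : e ≤ x := Int.le_of_dvd (by omega) h3
      have hey : e ≤ y := Int.le_of_dvd (by omega) h4
      exact ⟨⟨h1, by omega⟩, h3, h4⟩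
  have memR : ∀ e : Int,
      (e ∈ (bLoop (bGcd x y) 1).1 ++ (bLoop (bGcd x y) 1).2.reverse)
        ↔ 1 ≤ e ∧ e ∣ bGcd x y := by
    intro e
    rw [List.mem_append, List.mem_reverse, chS e, chL e]
    constructor
    · rintro (⟨h1, _, h3⟩ | ⟨h1, _, _, h4⟩)
      · exact ⟨h1, h3⟩
      · exact ⟨h1, h4⟩
    · rintro ⟨h1, h2⟩
      have heg : e ≤ bGcd x y := Int.le_of_dvd (by omega) h2
      rcases le_or_gt (e * e) (bGcd x y) with h | h
      · exact Or.inl ⟨h1, h, h2⟩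
      · exact Or.inr ⟨h1, h, by omega, h2⟩
  have sortedL : (PySem.List.pyRange 1 (min x y + 1) 1).filter
      (fun j => decide (PySem.Int.mod x j = 0 ∧ PySem.Int.mod y j = 0)) |>.Pairwise (· < ·) :=
    (PySem.List.pairwise_lt_pyRange_one 1 (min x y + 1)).filter _
  have sortedR : ((bLoop (bGcd x y) 1).1 ++ (bLoop (bGcd x y) 1).2.reverse).Pairwise (· < ·) := by
    rw [List.pairwise_append]
    refine ⟨pS, ?_, ?_⟩
    · rw [List.pairwise_reverse]
      exact pL
    · intro a ha b hb
      rw [List.mem_reverse] at hb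
      obtain ⟨ha1, ha2, _⟩ := (chS a).mp ha
      obtain ⟨hb1, hb2, _, _⟩ := (chL b).mp hb
      nlinarith
  have hperm := (List.perm_ext_iff_of_nodup sortedL.nodup sortedR.nodup).mpr
    (fun e => by rw [memL e, memR e])
  exact List.Perm.eq_of_pairwise (fun a b _ _ h1 h2 => absurd h1 (lt_asymm h2)) sortedL sortedR hperm

-- the two ways of picking the k-th element agree
theorem pick_eq (F : List Int) (k : Int) (hk : 1 ≤ k) :
    (F[(k - 1).toNat]?).getD (-1)
      = if k ≤ (F.length : Int) then (PySem.List.pyGet? F (k - 1)).getD (-1) else -1 := by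
  by_cases h : k ≤ (F.length : Int)
  · rw [if_pos h,
      show PySem.List.pyGet? F (k - 1) = F[(k - 1).toNat]? from PySem.List.pyGet?_of_nonneg F (by omega)]
  · rw [if_neg h, List.getElem?_eq_none (by omega)]
    rfl

-- ===== VERDICT (by name: the statement is the Claim_ definition above) =====
theorem vonva_spec : Claim_equal_vonva := by
  intro x y k _
  unfold Spec_vonva
  by_cases hxy : x ≤ 0 ∨ y ≤ 0
  · rw [vonva, vonva_alt, if_pos (by tauto), PySem.List.pyRange_one_eq_nil (by omega)]
    simp [vonvaGo]
  · push_neg at hxy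
    obtain ⟨hx, hy⟩ := hxy
    by_cases hk : k ≤ 0
    · rw [vonva, vonva_alt, if_pos (by omega), PySem.List.pyRange_one_cons (by omega)]
      have h1x : PySem.Int.mod x 1 = 0 := (PySem.Int.mod_eq_zero_iff_dvd x 1).mpr (one_dvd x)
      have h1y : PySem.Int.mod y 1 = 0 := (PySem.Int.mod_eq_zero_iff_dvd y 1).mpr (one_dvd y)
      simp only [vonvaGo, h1x, h1y, and_self, if_true]
      rw [if_neg (by omega)]
      exact vonvaGo_gt x y k _ (0 + 1) (by omega)
    · rw [vonva, vonva_alt, if_neg (by omega)]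
      rw [vonvaGo_char x y k _ 0 (by omega)]
      have hz : k - 0 - 1 = k - 1 := by ring
      rw [hz, lists_eq x y (by omega) (by omega), pick_eq _ k (by omega)]
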